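-- pv_equiv track=rewrite | github.com/LindaNayeli104/NumericalMethods | SolverLU.py | uneLU
-- ===== SOURCE A (Python) =====
-- def uneLU(L,U):
--     n = len(L)
--     a = []
--     for i in range(n):
--         a.append([])
--         for j in range(n):
--             a[i].append(0)
--     c = 0
--     for i in range(n,0,-1):
--         for j in range(i):
--             a[n-i][j+c] = U[n-i][j+c]
--         c+=1
--     #Ahora integramos L
--     for i in range(n-1,-1,-1):
--         for j in range(i):
--             a[i][j] = L[i][j]
--     return a
-- ===== SOURCE B (Python) =====
-- def uneLU(L, U):
--     n = len(L)
--     return [[U[i][j] if j >= i else L[i][j] for j in range(n)] for i in range(n)]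
-- ===== Notes on version B (the rewrite author's own statement) =====
-- stated objective: simpler
-- what changed: B builds each cell directly as U[i][j] for j>=i else L[i][j] in one nested comprehension, replacing A's zero-initialization pass plus two separate triangle-overwrite passes with the c counter.
import Mathlib
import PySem

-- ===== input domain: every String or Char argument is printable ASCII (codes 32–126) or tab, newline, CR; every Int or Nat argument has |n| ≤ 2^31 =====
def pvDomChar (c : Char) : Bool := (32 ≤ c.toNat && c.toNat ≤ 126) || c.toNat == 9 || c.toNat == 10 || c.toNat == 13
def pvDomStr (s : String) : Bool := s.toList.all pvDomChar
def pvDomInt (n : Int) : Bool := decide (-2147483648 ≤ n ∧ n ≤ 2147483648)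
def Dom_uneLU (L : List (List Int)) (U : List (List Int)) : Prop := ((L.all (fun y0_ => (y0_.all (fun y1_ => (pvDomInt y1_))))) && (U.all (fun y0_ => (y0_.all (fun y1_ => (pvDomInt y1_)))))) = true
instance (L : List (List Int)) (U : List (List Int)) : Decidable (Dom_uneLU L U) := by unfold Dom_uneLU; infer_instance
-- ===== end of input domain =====

-- B builds each cell of the merged matrix directly (U on/above the diagonal, L below) in one
-- nested comprehension instead of A's zero-fill pass plus two triangle-overwrite passes.

-- ===== PORT A =====
-- Python 'a[r][c] = v' (indices in range on every execution A reaches)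
def pvSet2 (a : List (List Int)) (r c : Nat) (v : Int) : List (List Int) :=
  a.set r ((a.getD r []).set c v)

def uneLU (L : List (List Int)) (U : List (List Int)) : List (List Int) :=
  let n : Int := (L.length : Int)
  let a0 : List (List Int) :=
    (PySem.List.pyRange 0 n 1).foldl
      (fun a _ => a ++ [(PySem.List.pyRange 0 n 1).foldl (fun row _ => row ++ [(0 : Int)]) []]) []
  let s :=
    (PySem.List.pyRange n 0 (-1)).foldl
      (fun (s : List (List Int) × Int) i =>
        ((PySem.List.pyRange 0 i 1).foldl
            (fun a j =>
              pvSet2 a (n - i).toNat (j + s.2).toNat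
                (PySem.List.pyGetD (PySem.List.pyGetD U (n - i) []) (j + s.2) 0)) s.1,
          s.2 + 1)) (a0, 0)
  (PySem.List.pyRange (n - 1) (-1) (-1)).foldl
    (fun a i =>
      (PySem.List.pyRange 0 i 1).foldl
        (fun a j =>
          pvSet2 a i.toNat j.toNat
            (PySem.List.pyGetD (PySem.List.pyGetD L i []) j 0)) a) s.1

-- ===== PORT B =====
def uneLU_alt (L : List (List Int)) (U : List (List Int)) : List (List Int) :=
  let n := L.length
  (List.range n).map (fun i =>
    (List.range n).map (fun j =>
      if i ≤ j then (U.getD i []).getD j 0 else (L.getD i []).getD j 0))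

-- ===== PRECONDITION & SPEC =====
-- Pre_ excludes exactly the inputs on which the Python A (and B alike) raises IndexError:
-- U, a row of U, or a row of L is too short for n = len(L).
def Pre_uneLU (L : List (List Int)) (U : List (List Int)) : Prop :=
  L.length ≤ U.length ∧
  ∀ i < L.length, L.length ≤ (U.getD i []).length ∧ i ≤ (L.getD i []).length
instance (L : List (List Int)) (U : List (List Int)) : Decidable (Pre_uneLU L U) := by
  unfold Pre_uneLU; infer_instance

def pvWitness_uneLU : List (List Int) × List (List Int) :=
  ([[1, 0], [5, 1]], [[2, 3], [0, 4]])

def Spec_uneLU (L : List (List Int)) (U : List (List Int)) (out : List (List Int)) : Prop := out = uneLU_alt L U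
instance (L : List (List Int)) (U : List (List Int)) (out : List (List Int)) : Decidable (Spec_uneLU L U out) := by unfold Spec_uneLU; infer_instance

-- ===== CLAIM (what is proved, stated in full; the proofs are below) =====
def Claim_equal_uneLU : Prop := ∀ (L : List (List Int)) (U : List (List Int)), Dom_uneLU L U → Pre_uneLU L U → Spec_uneLU L U (uneLU L U)

-- ===== LEMMAS AND PROOFS =====

-- canonical forms of A's three passes (proof-only helpers)
def pvUval (U : List (List Int)) (r t : Nat) : Int := (U.getD r []).getD t 0

def pvFU (U : List (List Int)) (n r : Nat) (row : List Int) : List Int :=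
  (List.range (n - r)).foldl (fun row j => row.set (j + r) (pvUval U r (j + r))) row

def pvFL (L : List (List Int)) (r : Nat) (row : List Int) : List Int :=
  (List.range r).foldl (fun row j => row.set j (pvUval L r j)) row

def pvAfterU (U : List (List Int)) (n : Nat) : List (List Int) :=
  (List.range n).foldl (fun a k => a.set k (pvFU U n k (a.getD k [])))
    (List.replicate n (List.replicate n 0))

def pvFinal (L U : List (List Int)) (n : Nat) : List (List Int) :=
  ((List.range n).map (fun k => n - 1 - k)).foldl
    (fun a r => a.set r (pvFL L r (a.getD r []))) (pvAfterU U n)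

lemma pv_set_getD_self {α : Type} (a : List α) (r : Nat) (d : α) :
    a.set r (a.getD r d) = a := by
  by_cases hr : r < a.length
  · rw [List.getD_eq_getElem a d hr]
    exact List.set_getElem_self hr
  · exact List.set_eq_of_length_le (by omega)

lemma pv_foldl_set_row {α : Type} (l : List α) (r : Nat) (g : α → Nat) (h : α → Int)
    (a : List (List Int)) :
    l.foldl (fun a x => pvSet2 a r (g x) (h x)) a
      = a.set r (l.foldl (fun row x => row.set (g x) (h x)) (a.getD r [])) := by
  induction l generalizing a with
  | nil => exact (pv_set_getD_self a r []).symm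
  | cons x t ih =>
      simp only [List.foldl_cons]
      rw [ih]
      have hg : (pvSet2 a r (g x) (h x)).getD r [] = (a.getD r []).set (g x) (h x) := by
        unfold pvSet2
        by_cases hr : r < a.length
        · rw [List.getD_eq_getElem _ _ (by simpa using hr)]
          simp
        · rw [List.getD_eq_default _ _ (by simp; omega),
              List.getD_eq_default _ _ (by omega)]
          simp
      rw [hg]
      unfold pvSet2
      rw [List.set_set]

lemma pv_foldl_reindex {α : Type} (g : α → Nat → α) (f : Nat → Nat) (l : List Nat) (init : α) :
    l.foldl (fun x y => g x (f y)) init = (l.map f).foldl g init :=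
  (List.foldl_map).symm

lemma pv_foldl_set_length (l : List Nat) (f : Nat → Int) (xs : List Int) :
    (l.foldl (fun xs k => xs.set k (f k)) xs).length = xs.length := by
  induction l generalizing xs with
  | nil => rfl
  | cons k t ih =>
      rw [List.foldl_cons, ih, List.length_set]

lemma pv_foldl_set_nodup (f : Nat → Int) :
    ∀ (l : List Nat), l.Nodup → ∀ (xs : List Int) (t : Nat),
      (l.foldl (fun xs k => xs.set k (f k)) xs)[t]? =
        if t ∈ l ∧ t < xs.length then some (f t) else xs[t]? := by
  intro l
  induction l with
  | nil => simp
  | cons k tl ih =>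
      intro hnd xs t
      have hk : k ∉ tl := (List.nodup_cons.mp hnd).1
      simp only [List.foldl_cons]
      rw [ih (List.nodup_cons.mp hnd).2]
      rw [List.getElem?_set, List.length_set]
      rcases eq_or_ne t k with rfl | hne
      · have htl : t ∉ tl := hk
        simp [htl, List.mem_cons]
        split_ifs with hlt
        · rfl
        · exact (List.getElem?_eq_none (by omega)).symm
      · by_cases htl : t ∈ tl <;>
          simp [htl, List.mem_cons, hne, hne.symm]

lemma pv_mat_fold_length (F : Nat → List Int → List Int) (l : List Nat)
    (a : List (List Int)) :
    (l.foldl (fun a k => a.set k (F k (a.getD k []))) a).length = a.length := by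
  induction l generalizing a with
  | nil => rfl
  | cons k t ih =>
      rw [List.foldl_cons, ih, List.length_set]

lemma pv_mat_fold_nodup (F : Nat → List Int → List Int) :
    ∀ (l : List Nat), l.Nodup → ∀ (a : List (List Int)) (r : Nat),
      (l.foldl (fun a k => a.set k (F k (a.getD k []))) a)[r]? =
        if r ∈ l ∧ r < a.length then some (F r (a.getD r [])) else a[r]? := by
  intro l
  induction l with
  | nil => simp
  | cons k tl ih =>
      intro hnd a r
      have hk : k ∉ tl := (List.nodup_cons.mp hnd).1
      simp only [List.foldl_cons]
      rw [ih (List.nodup_cons.mp hnd).2]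
      rw [List.getElem?_set, List.length_set]
      rcases eq_or_ne r k with rfl | hne
      · have htl : r ∉ tl := hk
        simp [htl, List.mem_cons]
        split_ifs with hlt
        · rfl
        · exact (List.getElem?_eq_none (by omega)).symm
      · by_cases htl : r ∈ tl <;>
          simp [htl, List.mem_cons, hne, hne.symm]

lemma pv_foldl_counter {β : Type} (G : Nat → Int → β → β) :
    ∀ (m s : Nat) (b : β),
      (List.range' s m).foldl (fun (p : β × Int) k => (G k p.2 p.1, p.2 + 1)) (b, (s : Int))
        = ((List.range' s m).foldl (fun b k => G k (k : Int) b) b, ((s + m : Nat) : Int)) := by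
  intro m
  induction m with
  | zero => simp
  | succ m ih =>
      intro s b
      rw [List.range'_succ, List.foldl_cons, List.foldl_cons]
      have h1 : ((s : Int) + 1) = ((s + 1 : Nat) : Int) := by push_cast; ring
      rw [h1, ih (s + 1) (G s (s : Int) b)]
      congr 1
      omega

lemma pv_foldl_counter_range {β : Type} (G : Nat → Int → β → β) (n : Nat) (b : β) :
    (List.range n).foldl (fun (p : β × Int) k => (G k p.2 p.1, p.2 + 1)) (b, 0)
      = ((List.range n).foldl (fun b k => G k (k : Int) b) b, (n : Int)) := by
  rw [List.range_eq_range']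
  have h := pv_foldl_counter G n 0 b
  simpa using h

lemma pv_replicate_of_map_const (n : Nat) {α : Type} (z : α) (g : Nat → α)
    (hg : ∀ k, g k = z) : (List.range n).map g = List.replicate n z := by
  induction n with
  | zero => rfl
  | succ m ih => rw [List.range_succ, List.map_append, ih, List.replicate_succ']; simp [hg]

lemma pv_stageA (L U : List (List Int)) : uneLU L U = pvFinal L U L.length := by
  simp only [uneLU]
  have hz : (PySem.List.pyRange 0 ((L.length : Int)) 1).foldl
      (fun row _ => row ++ [(0 : Int)]) ([] : List Int) = List.replicate L.length (0 : Int) := by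
    rw [PySem.List.foldl_append_singleton_eq_map (f := fun _ => (0 : Int))]
    rw [PySem.List.pyRange_zero_natCast, List.nil_append, List.map_map]
    exact pv_replicate_of_map_const _ _ _ (fun k => rfl)
  have ha0 : (PySem.List.pyRange 0 ((L.length : Int)) 1).foldl
      (fun a _ => a ++ [(PySem.List.pyRange 0 ((L.length : Int)) 1).foldl
        (fun row _ => row ++ [(0 : Int)]) []]) ([] : List (List Int))
      = List.replicate L.length (List.replicate L.length (0 : Int)) := by
    rw [hz]
    rw [PySem.List.foldl_append_singleton_eq_map (f := fun _ => List.replicate L.length (0 : Int))]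
    rw [PySem.List.pyRange_zero_natCast, List.nil_append, List.map_map]
    exact pv_replicate_of_map_const _ _ _ (fun k => rfl)
  rw [ha0]
  -- the U pass
  rw [PySem.List.pyRange_neg_one]
  rw [show (((L.length : Int)) - 0).toNat = L.length by omega]
  rw [List.foldl_map]
  rw [pv_foldl_counter_range (G := fun k c a =>
      (PySem.List.pyRange 0 ((L.length : Int) - (k : Int)) 1).foldl
        (fun a j => pvSet2 a ((L.length : Int) - ((L.length : Int) - (k : Int))).toNat (j + c).toNat
          (PySem.List.pyGetD (PySem.List.pyGetD U ((L.length : Int) - ((L.length : Int) - (k : Int))) []) (j + c) 0)) a)]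
  dsimp only
  have hstepU : ∀ (acc : List (List Int)), ∀ k ∈ List.range L.length,
      (PySem.List.pyRange 0 ((L.length : Int) - (k : Int)) 1).foldl
        (fun a j => pvSet2 a ((L.length : Int) - ((L.length : Int) - (k : Int))).toNat (j + (k : Int)).toNat
          (PySem.List.pyGetD (PySem.List.pyGetD U ((L.length : Int) - ((L.length : Int) - (k : Int))) []) (j + (k : Int)) 0)) acc
        = acc.set k (pvFU U L.length k (acc.getD k [])) := by
    intro acc k hk
    rw [List.mem_range] at hk
    rw [show ((L.length : Int) - ((L.length : Int) - (k : Int))) = (k : Int) by ring]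
    rw [show ((L.length : Int) - (k : Int)) = ((L.length - k : Nat) : Int) by omega]
    rw [PySem.List.pyRange_zero_natCast, List.foldl_map]
    simp only [← Nat.cast_add, Int.toNat_natCast, PySem.List.pyGetD_natCast]
    rw [pv_foldl_set_row (r := k) (g := fun j => j + k)
        (h := fun j => (U.getD k []).getD (j + k) 0)]
    rfl
  rw [PySem.List.foldl_congr_mem (List.range L.length) _ _ _ hstepU]
  -- the L pass
  rw [PySem.List.pyRange_neg_one]
  rw [show (((L.length : Int) - 1) - (-1)).toNat = L.length by omega]
  rw [List.foldl_map]
  have hstepL : ∀ (acc : List (List Int)), ∀ k ∈ List.range L.length,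
      (PySem.List.pyRange 0 ((L.length : Int) - 1 - (k : Int)) 1).foldl
        (fun a j => pvSet2 a ((L.length : Int) - 1 - (k : Int)).toNat j.toNat
          (PySem.List.pyGetD (PySem.List.pyGetD L ((L.length : Int) - 1 - (k : Int)) []) j 0)) acc
        = acc.set (L.length - 1 - k) (pvFL L (L.length - 1 - k) (acc.getD (L.length - 1 - k) [])) := by
    intro acc k hk
    rw [List.mem_range] at hk
    rw [show ((L.length : Int) - 1 - (k : Int)) = ((L.length - 1 - k : Nat) : Int) by omega]
    rw [PySem.List.pyRange_zero_natCast, List.foldl_map]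
    simp only [Int.toNat_natCast, PySem.List.pyGetD_natCast]
    rw [pv_foldl_set_row (r := L.length - 1 - k) (g := fun j => j)
        (h := fun j => (L.getD (L.length - 1 - k) []).getD j 0)]
    rfl
  rw [PySem.List.foldl_congr_mem (List.range L.length) _ _ _ hstepL]
  rw [pv_foldl_reindex (g := fun (a : List (List Int)) r => a.set r (pvFL L r (a.getD r [])))
      (f := fun k => L.length - 1 - k)]
  rfl

lemma pv_FU_getElem? (U : List (List Int)) (n r : Nat) (row : List Int) (t : Nat) :
    (pvFU U n r row)[t]? =
      if (r ≤ t ∧ t < r + (n - r)) ∧ t < row.length then some (pvUval U r t) else row[t]? := by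
  unfold pvFU
  rw [pv_foldl_reindex (g := fun (row : List Int) m => row.set m (pvUval U r m)) (f := fun j => j + r)]
  have hnd : ((List.range (n - r)).map (fun j => j + r)).Nodup :=
    List.Nodup.map (fun a b h => by omega) List.nodup_range
  rw [pv_foldl_set_nodup (pvUval U r) _ hnd]
  have hmem : (t ∈ (List.range (n - r)).map (fun j => j + r)) ↔ (r ≤ t ∧ t < r + (n - r)) := by
    simp only [List.mem_map, List.mem_range]
    constructor
    · rintro ⟨j, hj, rfl⟩
      omega
    · rintro ⟨h1, h2⟩
      exact ⟨t - r, by omega, by omega⟩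
  rw [if_congr (and_congr_left' hmem) rfl rfl]

lemma pv_FL_getElem? (L : List (List Int)) (r : Nat) (row : List Int) (t : Nat) :
    (pvFL L r row)[t]? =
      if t < r ∧ t < row.length then some (pvUval L r t) else row[t]? := by
  unfold pvFL
  rw [pv_foldl_set_nodup (pvUval L r) _ List.nodup_range]
  rw [if_congr (and_congr_left' List.mem_range) rfl rfl]

lemma pv_afterU_getElem? (U : List (List Int)) (n : Nat) (r : Nat) :
    (pvAfterU U n)[r]? =
      if r < n then some (pvFU U n r (List.replicate n 0)) else none := by
  unfold pvAfterU
  rw [pv_mat_fold_nodup _ _ List.nodup_range]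
  by_cases hr : r < n <;>
    simp [hr, List.getD_eq_getElem?_getD, List.mem_range]

lemma pv_final_getElem? (L U : List (List Int)) (n : Nat) (r : Nat) :
    (pvFinal L U n)[r]? =
      if r < n then some (pvFL L r (pvFU U n r (List.replicate n 0))) else none := by
  unfold pvFinal
  have hlen : (pvAfterU U n).length = n := by
    unfold pvAfterU
    rw [pv_mat_fold_length]
    simp
  have hnd : ((List.range n).map (fun k => n - 1 - k)).Nodup := by
    refine List.Nodup.map_on ?_ List.nodup_range
    intro x hx y hy h
    rw [List.mem_range] at hx hy
    omega
  rw [pv_mat_fold_nodup _ _ hnd]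
  have hmem : ∀ r', (r' ∈ (List.range n).map (fun k => n - 1 - k)) ↔ r' < n := by
    intro r'
    simp only [List.mem_map, List.mem_range]
    constructor
    · rintro ⟨k, hk, rfl⟩
      omega
    · intro h
      exact ⟨n - 1 - r', by omega, by omega⟩
  by_cases hr : r < n
  · rw [if_pos ⟨(hmem r).mpr hr, by omega⟩]
    have hgd : (pvAfterU U n).getD r [] = pvFU U n r (List.replicate n 0) := by
      rw [List.getD_eq_getElem?_getD, pv_afterU_getElem?, if_pos hr]
      rfl
    rw [hgd, if_pos hr]
  · rw [if_neg (by rw [hmem]; omega), pv_afterU_getElem?, if_neg hr, if_neg hr]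

lemma pv_pointwise (L U : List (List Int)) : pvFinal L U L.length = uneLU_alt L U := by
  simp only [uneLU_alt]
  apply List.ext_getElem?
  intro r
  rw [pv_final_getElem?, List.getElem?_map]
  by_cases hr : r < L.length
  · rw [if_pos hr, List.getElem?_range hr]
    simp only [Option.map_some]
    congr 1
    apply List.ext_getElem?
    intro t
    have hFUlen : (pvFU U L.length r (List.replicate L.length (0 : Int))).length = L.length := by
      unfold pvFU
      rw [pv_foldl_reindex (g := fun (row : List Int) m => row.set m (pvUval U r m)) (f := fun j => j + r)]
      rw [pv_foldl_set_length]
      simp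
    rw [pv_FL_getElem?, List.getElem?_map]
    by_cases ht : t < L.length
    · rw [List.getElem?_range ht]
      simp only [Option.map_some]
      by_cases htr : t < r
      · rw [if_pos ⟨htr, by rw [hFUlen]; exact ht⟩]
        rw [if_neg (by omega)]
        rfl
      · rw [if_neg (by rintro ⟨h1, _⟩; omega)]
        rw [pv_FU_getElem?]
        rw [if_pos ⟨⟨by omega, by omega⟩, by simpa using ht⟩]
        rw [if_pos (by omega)]
        rfl
    · have hnone : (List.range L.length)[t]? = none :=
        List.getElem?_eq_none (by simpa using ht)
      rw [hnone]
      simp only [Option.map_none]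
      rw [if_neg (by rintro ⟨_, h2⟩; rw [hFUlen] at h2; omega)]
      rw [pv_FU_getElem?]
      rw [if_neg (by rintro ⟨⟨_, h2⟩, _⟩; omega)]
      exact List.getElem?_eq_none (by simp; omega)
  · rw [if_neg hr]
    have hnone : (List.range L.length)[r]? = none :=
      List.getElem?_eq_none (by simpa using hr)
    rw [hnone]
    rfl

-- ===== VERDICT (by name: the statement is the Claim_ definition above) =====
theorem uneLU_spec : Claim_equal_uneLU := by
  intro L U _ _
  unfold Spec_uneLU
  rw [pv_stageA, pv_pointwise]
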